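-- pv_equiv track=rewrite | github.com/arknave/project-euler | python/pe560.py | brute_grundy
-- ===== SOURCE A (Python) =====
-- import math
--
-- def brute_grundy(n):
--     grundy = [0 for _ in range(n)]
--     for i in range(1, n):
--         seen = set()
--         for j in range(1, i + 1):
--             if math.gcd(i, j) == 1:
--                 seen.add(grundy[i - j])
--
--         while grundy[i] in seen:
--             grundy[i] += 1
--
--     return grundy
-- ===== SOURCE B (Python) =====
-- import math
--
-- def brute_grundy(n):
--     # Forward-propagation sieve: instead of rebuilding a 'seen' set for each i
--     # by scanning backwards, keep one persistent set per index and push each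
--     # computed Grundy value forward to every later coprime index.
--     grundy = [0] * n
--     seen = [set() for _ in range(n)]
--     if n > 1:
--         seen[1].add(0)          # grundy[0] = 0 reaches k only when gcd(k, 0) == k == 1
--     for i in range(1, n):
--         g = 0
--         while g in seen[i]:
--             g += 1
--         grundy[i] = g
--         for k in range(i + 1, n):
--             if math.gcd(k, i) == 1:
--                 seen[k].add(g)
--     return grundy
-- ===== Notes on version B (the rewrite author's own statement) =====
-- stated objective: alternative
-- what changed: A rebuilds a fresh 'seen' set for each i by scanning all earlier positions backwards; B keeps one persistent array of sets and, after computing grundy[i] as the mex of its own set, pushes that value forward to every later coprime index (a pull-based rescan becomes a forward-propagation sieve).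
import Mathlib
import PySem

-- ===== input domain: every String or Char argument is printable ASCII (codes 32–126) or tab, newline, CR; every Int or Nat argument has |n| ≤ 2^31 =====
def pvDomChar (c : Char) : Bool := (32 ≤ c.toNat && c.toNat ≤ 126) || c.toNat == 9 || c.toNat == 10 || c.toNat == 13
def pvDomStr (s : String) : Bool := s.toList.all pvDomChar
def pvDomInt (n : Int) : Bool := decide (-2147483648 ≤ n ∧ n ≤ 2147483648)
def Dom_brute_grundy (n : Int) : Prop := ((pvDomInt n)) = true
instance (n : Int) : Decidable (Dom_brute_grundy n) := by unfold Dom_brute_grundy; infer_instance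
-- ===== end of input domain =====

-- B replaces A's per-index backward rescan (rebuilding `seen` from scratch for each i)
-- by a forward-propagation sieve over one persistent array of sets (objective: alternative).

-- Both Pythons contain the identical loop `while g in seen: g += 1`; pvMex is its port
-- (it needs pvMex_measure for termination).
theorem pvMex_measure {seen : List Int} {v : Int} (h : v ∈ seen) :
    seen.countP (fun x => decide (v + 1 ≤ x)) < seen.countP (fun x => decide (v ≤ x)) := by
  induction seen with
  | nil => cases h
  | cons a t ih =>
    have hmono : t.countP (fun x => decide (v + 1 ≤ x)) ≤ t.countP (fun x => decide (v ≤ x)) := by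
      apply List.countP_mono_left
      intro x _ hx
      simp only [decide_eq_true_eq] at hx ⊢; omega
    rcases List.mem_cons.1 h with rfl | hmem
    · simp only [List.countP_cons]
      split_ifs <;> simp only [decide_eq_true_eq ] at * <;> omega
    · have := ih hmem
      simp only [List.countP_cons]
      split_ifs <;> simp only [decide_eq_true_eq ] at * <;> omega

def pvMex (seen : List Int) (v : Int) : Int :=
  if h : v ∈ seen then pvMex seen (v + 1) else v
termination_by seen.countP (fun x => decide (v ≤ x))
decreasing_by exact pvMex_measure h

-- ===== PORT A =====
-- All list subscripts in A are in range (0 ≤ idx < n), so the total forms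
-- pyGetD / pySetD are exact here.  A's `while grundy[i] in seen: grundy[i] += 1`
-- reads/writes one cell; ported as one write of the loop's final value (pvMex).
def stepA (grundy : List Int) (i : Int) : List Int :=
  let seen : PySem.Set Int :=
    (PySem.List.pyRange 1 (i + 1) 1).foldl
      (fun seen j =>
        if Int.gcd i j = 1 then PySem.Set.add seen (PySem.List.pyGetD grundy (i - j) 0)
        else seen)
      PySem.Set.empty
  PySem.List.pySetD grundy i (pvMex seen (PySem.List.pyGetD grundy i 0))

def brute_grundy (n : Int) : List Int :=
  (PySem.List.pyRange 1 n 1).foldl stepA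
    ((PySem.List.pyRange 0 n 1).map (fun _ => (0 : Int)))

-- ===== PORT B =====
-- state = (grundy, seen); the inner loop pushes grundy[i] forward to seen[k]
-- for every later k coprime to i.
def stepB (n : Int) (st : List Int × List (PySem.Set Int)) (i : Int) :
    List Int × List (PySem.Set Int) :=
  let g := pvMex (PySem.List.pyGetD st.2 i PySem.Set.empty) 0
  let grundy := PySem.List.pySetD st.1 i g
  let seen :=
    (PySem.List.pyRange (i + 1) n 1).foldl
      (fun sn k =>
        if Int.gcd k i = 1 then
          PySem.List.pySetD sn k (PySem.Set.add (PySem.List.pyGetD sn k PySem.Set.empty) g)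
        else sn)
      st.2
  (grundy, seen)

def brute_grundy_alt (n : Int) : List Int :=
  let grundy := PySem.List.pyRepeat [(0 : Int)] n
  let seen : List (PySem.Set Int) := (PySem.List.pyRange 0 n 1).map (fun _ => PySem.Set.empty)
  let seen :=
    if 1 < n then
      PySem.List.pySetD seen 1
        (PySem.Set.add (PySem.List.pyGetD seen 1 PySem.Set.empty) 0)
    else seen
  ((PySem.List.pyRange 1 n 1).foldl (stepB n) (grundy, seen)).1

-- ===== PRECONDITION & SPEC =====
def Spec_brute_grundy (n : Int) (out : List Int) : Prop := out = brute_grundy_alt n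
instance (n : Int) (out : List Int) : Decidable (Spec_brute_grundy n out) := by
  unfold Spec_brute_grundy; infer_instance

-- ===== CLAIM (what is proved, stated in full; the proofs are below) =====
def Claim_equal_brute_grundy : Prop := ∀ (n : Int), Dom_brute_grundy n → Spec_brute_grundy n (brute_grundy n)

-- ===== LEMMAS AND PROOFS =====

-- The common mathematical value: grundy prefix of length N, built left to right.
def specSet (g : List Int) (i : Nat) : List Int :=
  ((List.range i).filter (fun k => decide (Nat.gcd i k = 1))).map (fun k => g.getD k 0)

def specStep (g : List Int) (i : Nat) : List Int := g ++ [pvMex (specSet g i) 0]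

def specList (N : Nat) : List Int := (List.range N).foldl specStep []

theorem specList_succ (N : Nat) :
    specList (N + 1) = specList N ++ [pvMex (specSet (specList N) N) 0] := by
  simp [specList, List.range_succ, specStep]

theorem specList_length (N : Nat) : (specList N).length = N := by
  induction N with
  | zero => rfl
  | succ m ih => simp [specList_succ, ih]

-- pvMex's defining properties
theorem pvMex_spec (seen : List Int) (v : Int) :
    pvMex seen v ∉ seen ∧ v ≤ pvMex seen v ∧
      ∀ w, v ≤ w → w < pvMex seen v → w ∈ seen := by
  fun_induction pvMex seen v with
  | case1 v_ h ih =>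
    rcases ih with ⟨h1, h2, h3⟩
    refine ⟨h1, by omega, ?_⟩
    intro w hw1 hw2
    by_cases hw : w = v_
    · exact hw ▸ h
    · exact h3 w (by omega) hw2
  | case2 v_ h =>
    exact ⟨h, le_refl _, fun w h1 h2 => absurd (lt_of_le_of_lt h1 h2) (lt_irrefl _)⟩

theorem pvMex_congr (s t : List Int) (v : Int) (h : ∀ x, x ∈ s ↔ x ∈ t) :
    pvMex s v = pvMex t v := by
  obtain ⟨a1, a2, a3⟩ := pvMex_spec s v
  obtain ⟨b1, b2, b3⟩ := pvMex_spec t v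
  rcases lt_trichotomy (pvMex s v) (pvMex t v) with hlt | heq | hgt
  · exact absurd ((h _).2 (b3 _ a2 hlt)) a1
  · exact heq
  · exact absurd ((h _).1 (a3 _ b2 hgt)) b1

theorem pvMex_nil (v : Int) : pvMex [] v = v := by
  rw [pvMex]; simp

theorem specList_one : specList 1 = [0] := by
  simp [specList, specStep, specSet, pvMex_nil]

theorem mem_specSet (g : List Int) (i : Nat) (v : Int) :
    v ∈ specSet g i ↔ ∃ k, k < i ∧ Nat.gcd i k = 1 ∧ v = g.getD k 0 := by
  simp only [specSet, List.mem_map, List.mem_filter, List.mem_range, decide_eq_true_eq]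
  constructor
  · rintro ⟨k, ⟨hk, hg⟩, rfl⟩; exact ⟨k, hk, hg, rfl⟩
  · rintro ⟨k, hk, hg, rfl⟩; exact ⟨k, ⟨hk, hg⟩, rfl⟩

theorem getD_set_self {α : Type} (l : List α) (n : Nat) (a d : α) (hn : n < l.length) :
    (l.set n a).getD n d = a := by
  simp [List.getD_eq_getElem?_getD, hn]

theorem getD_set_ne {α : Type} (l : List α) (n m : Nat) (a d : α) (hm : m ≠ n) :
    (l.set n a).getD m d = l.getD m d := by
  simp [List.getD_eq_getElem?_getD, Ne.symm hm]

theorem set_boundary0 (l : List Int) (c : Nat) (hc : 1 ≤ c) (v : Int) :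
    (l ++ List.replicate c (0 : Int)).set l.length v = (l ++ [v]) ++ List.replicate (c - 1) 0 := by
  obtain ⟨M, rfl⟩ : ∃ M, c = M + 1 := ⟨c - 1, by omega⟩
  rw [List.replicate_succ]
  simp

theorem set_boundary (l : List Int) (c i : Nat) (hi : l.length = i) (hc : 1 ≤ c) (v : Int) :
    (l ++ List.replicate c (0 : Int)).set i v = (l ++ [v]) ++ List.replicate (c - 1) 0 := by
  subst hi; exact set_boundary0 l c hc v

theorem replicate_split1 (N : Nat) (h : 1 ≤ N) :
    List.replicate N (0 : Int) = specList 1 ++ List.replicate (N - 1) 0 := by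
  obtain ⟨M, rfl⟩ : ∃ M, N = M + 1 := ⟨N - 1, by omega⟩
  rw [specList_one]; simp [List.replicate_succ]

-- membership in A's per-i `seen` set, over the padded grundy array
theorem memA (i N : Nat) (h1 : 1 ≤ i) (_h2 : i < N) (v : Int) :
    (v ∈ (PySem.List.pyRange 1 ((i : Int) + 1) 1).foldl
        (fun seen j =>
          if Int.gcd (i : Int) j = 1 then
            PySem.Set.add seen
              (PySem.List.pyGetD (specList i ++ List.replicate (N - i) 0) ((i : Int) - j) 0)
          else seen)
        PySem.Set.empty)
      ↔ v ∈ specSet (specList i) i := by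
  rw [PySem.List.foldl_ite_eq_foldl_filter, PySem.Set.mem_foldl_add, mem_specSet]
  constructor
  · rintro (h | ⟨j, hj, rfl⟩)
    · cases h
    · rw [List.mem_filter] at hj
      obtain ⟨hjr, hjg⟩ := hj
      rw [PySem.List.mem_pyRange_one] at hjr
      simp only [decide_eq_true_eq] at hjg
      refine ⟨((i : Int) - j).toNat, by omega, ?_, ?_⟩
      · have hcast : (((((i : Int) - j).toNat : Nat)) : Int) = (i : Int) - j := by omega
        have : Int.gcd (i : Int) ((((i : Int) - j).toNat : Nat) : Int) = 1 := by
          rw [hcast]; rw [Int.gcd_self_sub_right]; exact hjg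
        rwa [Int.gcd_natCast_natCast] at this
      · have hcast : (((((i : Int) - j).toNat : Nat)) : Int) = (i : Int) - j := by omega
        rw [← hcast, PySem.List.pyGetD_natCast,
          List.getD_append _ _ _ _ (by rw [specList_length]; omega)]
        congr 1
  · rintro ⟨k, hk, hg, rfl⟩
    right
    refine ⟨(i : Int) - (k : Int), ?_, ?_⟩
    · rw [List.mem_filter, PySem.List.mem_pyRange_one]
      constructor
      · constructor <;> omega
      · simp only [decide_eq_true_eq]
        rw [Int.gcd_self_sub_right, Int.gcd_natCast_natCast]; exact hg
    · have hcast : ((k : Nat) : Int) = (i : Int) - ((i : Int) - (k : Int)) := by omega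
      rw [show (i : Int) - ((i : Int) - (k : Int)) = ((k : Nat) : Int) from hcast.symm,
        PySem.List.pyGetD_natCast,
        List.getD_append _ _ _ _ (by rw [specList_length]; omega)]

theorem stepA_spec (N i : Nat) (h1 : 1 ≤ i) (h2 : i < N) :
    stepA (specList i ++ List.replicate (N - i) 0) (i : Int) =
      specList (i + 1) ++ List.replicate (N - (i + 1)) 0 := by
  have hstart : PySem.List.pyGetD (specList i ++ List.replicate (N - i) 0) ((i : Int)) 0 = 0 := by
    rw [show ((i : Int)) = ((i : Nat) : Int) from rfl, PySem.List.pyGetD_natCast,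
      List.getD_append_right _ _ _ _ (by rw [specList_length])]
    rw [specList_length]
    obtain ⟨M, hM⟩ : ∃ M, N - i = M + 1 := ⟨N - i - 1, by omega⟩
    rw [hM]; simp [List.replicate_succ]
  simp only [stepA]
  rw [hstart, pvMex_congr _ _ _ (memA i N h1 h2)]
  rw [show ((i : Int)) = ((i : Nat) : Int) from rfl, PySem.List.pySetD_natCast]
  rw [set_boundary _ _ _ (specList_length i) (by omega)]
  rw [specList_succ, Nat.sub_sub]

theorem loopA (N : Nat) :
    ∀ i : Nat, 1 ≤ i → i ≤ N →
      (PySem.List.pyRange 1 (i : Int) 1).foldl stepA (List.replicate N 0) =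
        specList i ++ List.replicate (N - i) 0 := by
  intro i
  induction i with
  | zero => intro h; omega
  | succ m ih =>
    intro _ h2
    by_cases hm : m = 0
    · subst hm
      rw [show ((1 : Nat) : Int) = 1 from rfl, PySem.List.pyRange_one_eq_nil (by omega),
        List.foldl_nil]
      exact replicate_split1 N (by omega)
    · have hm1 : 1 ≤ m := by omega
      rw [show ((m + 1 : Nat) : Int) = (m : Int) + 1 by push_cast; ring,
        PySem.List.pyRange_one_succ_right (by exact_mod_cast Nat.one_le_cast.2 hm1),
        List.foldl_append, List.foldl_cons, List.foldl_nil,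
        ih hm1 (by omega)]
      exact stepA_spec N m hm1 (by omega)

theorem A_eq (n : Int) : brute_grundy n = specList n.toNat := by
  by_cases hn : n ≤ 0
  · unfold brute_grundy
    rw [PySem.List.pyRange_one_eq_nil hn, PySem.List.pyRange_one_eq_nil (by omega),
      List.foldl_nil, List.map_nil, show n.toNat = 0 by omega]
    rfl
  · replace hn : 0 < n := by omega
    obtain ⟨N, rfl⟩ : ∃ N : Nat, n = (N : Int) := ⟨n.toNat, by omega⟩
    have hN : 1 ≤ N := by omega
    unfold brute_grundy
    have hinit : (PySem.List.pyRange 0 (N : Int) 1).map (fun _ => (0 : Int)) =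
        List.replicate N 0 := by
      rw [List.map_const']
      congr 1
      rw [PySem.List.length_pyRange_one]; omega
    rw [hinit, loopA N N hN le_rfl, Int.toNat_natCast]
    simp

-- ===== B side =====
def stepBN (i : Nat) (g' : Int) (sn : List (PySem.Set Int)) (k : Nat) : List (PySem.Set Int) :=
  if Nat.gcd k i = 1 then sn.set k (PySem.Set.add (sn.getD k []) g') else sn

theorem stepBN_len (i : Nat) (g' : Int) (sn : List (PySem.Set Int)) (k : Nat) :
    (stepBN i g' sn k).length = sn.length := by
  unfold stepBN; split <;> simp

theorem innerB_len (i : Nat) (g' : Int) (L : List Nat) :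
    ∀ sn, (L.foldl (stepBN i g') sn).length = sn.length := by
  induction L with
  | nil => intro sn; rfl
  | cons a L ih => intro sn; rw [List.foldl_cons, ih, stepBN_len]

theorem innerB_mem (i : Nat) (g' : Int) (L : List Nat) :
    ∀ sn : List (PySem.Set Int), (∀ x ∈ L, x < sn.length) → ∀ (m : Nat) (v : Int),
      (v ∈ (L.foldl (stepBN i g') sn).getD m [] ↔
        v ∈ sn.getD m [] ∨ (m ∈ L ∧ Nat.gcd m i = 1 ∧ v = g')) := by
  induction L with
  | nil => intro sn _ m v; simp
  | cons a L ih =>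
    intro sn hL m v
    rw [List.foldl_cons,
      ih _ (fun x hx => by rw [stepBN_len]; exact hL x (List.mem_cons_of_mem _ hx))]
    have ha : a < sn.length := hL a List.mem_cons_self
    have hmem1 : v ∈ (stepBN i g' sn a).getD m [] ↔
        v ∈ sn.getD m [] ∨ (m = a ∧ Nat.gcd m i = 1 ∧ v = g') := by
      unfold stepBN
      by_cases hc : Nat.gcd a i = 1
      · rw [if_pos hc]
        by_cases hma : m = a
        · subst hma
          rw [getD_set_self _ _ _ _ ha, PySem.Set.mem_add]
          tauto
        · rw [getD_set_ne _ _ _ _ _ hma]; tauto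
      · rw [if_neg hc]
        constructor
        · tauto
        · rintro (h | ⟨rfl, hg, _⟩)
          · exact h
          · exact absurd hg hc
    rw [hmem1, List.mem_cons]
    tauto

theorem innerB_conv (i N : Nat) (g' : Int) (sn : List (PySem.Set Int)) :
    (PySem.List.pyRange ((i : Int) + 1) (N : Int) 1).foldl
      (fun sn k =>
        if Int.gcd k (i : Int) = 1 then
          PySem.List.pySetD sn k (PySem.Set.add (PySem.List.pyGetD sn k PySem.Set.empty) g')
        else sn) sn
    = ((List.range (N - (i + 1))).map (fun t => i + 1 + t)).foldl (stepBN i g') sn := by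
  rw [PySem.List.pyRange_one,
    show ((N : Int) - ((i : Int) + 1)).toNat = N - (i + 1) by omega,
    List.foldl_map, List.foldl_map]
  apply PySem.List.foldl_congr_mem
  intro acc t _
  rw [show (i : Int) + 1 + (t : Int) = ((i + 1 + t : Nat) : Int) by push_cast; ring]
  unfold stepBN
  rw [Int.gcd_natCast_natCast, PySem.List.pySetD_natCast, PySem.List.pyGetD_natCast]
  rfl

def seenOK (N i : Nat) (sn : List (PySem.Set Int)) : Prop :=
  sn.length = N ∧ ∀ m : Nat, i ≤ m → m < N → ∀ v : Int,
    (v ∈ sn.getD m [] ↔ ∃ k : Nat, k < i ∧ Nat.gcd m k = 1 ∧ v = (specList i).getD k 0)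

theorem specList_getD_succ_lt (i k : Nat) (hk : k < i) :
    (specList (i + 1)).getD k 0 = (specList i).getD k 0 := by
  rw [specList_succ]
  exact List.getD_append _ _ _ _ (by rw [specList_length]; omega)

theorem specList_getD_self (i : Nat) :
    (specList (i + 1)).getD i 0 = pvMex (specSet (specList i) i) 0 := by
  rw [specList_succ, List.getD_append_right _ _ _ _ (by rw [specList_length])]
  rw [specList_length]
  simp

theorem loopB (N : Nat) (_hN : 1 ≤ N) (sn0 : List (PySem.Set Int)) (h0 : seenOK N 1 sn0) :
    ∀ i : Nat, 1 ≤ i → i ≤ N →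
      ((PySem.List.pyRange 1 (i : Int) 1).foldl (stepB (N : Int))
          (List.replicate N 0, sn0)).1
        = specList i ++ List.replicate (N - i) 0
      ∧ seenOK N i ((PySem.List.pyRange 1 (i : Int) 1).foldl (stepB (N : Int))
          (List.replicate N 0, sn0)).2 := by
  intro i
  induction i with
  | zero => intro h; omega
  | succ m ih =>
    intro _ h2
    by_cases hm : m = 0
    · subst hm
      rw [show ((1 : Nat) : Int) = 1 from rfl, PySem.List.pyRange_one_eq_nil (by omega),
        List.foldl_nil]
      exact ⟨replicate_split1 N (by omega), h0⟩
    · have hm1 : 1 ≤ m := by omega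
      obtain ⟨ihf, ihs⟩ := ih hm1 (by omega)
      rw [show ((m + 1 : Nat) : Int) = (m : Int) + 1 by push_cast; ring,
        PySem.List.pyRange_one_succ_right (by exact_mod_cast Nat.one_le_cast.2 hm1),
        List.foldl_append, List.foldl_cons, List.foldl_nil]
      set P := (PySem.List.pyRange 1 (m : Int) 1).foldl (stepB (N : Int))
        (List.replicate N 0, sn0) with hP
      obtain ⟨hlen, hinv⟩ := ihs
      have hg : pvMex (PySem.List.pyGetD P.2 ((m : Int)) PySem.Set.empty) 0 =
          pvMex (specSet (specList m) m) 0 := by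
        rw [show ((m : Int)) = ((m : Nat) : Int) from rfl, PySem.List.pyGetD_natCast]
        apply pvMex_congr
        intro v
        rw [show (PySem.Set.empty : PySem.Set Int) = [] from rfl,
          hinv m le_rfl (by omega) v, mem_specSet]
      have hfst : PySem.List.pySetD P.1 ((m : Int))
          (pvMex (specSet (specList m) m) 0) =
          specList (m + 1) ++ List.replicate (N - (m + 1)) 0 := by
        rw [ihf, show ((m : Int)) = ((m : Nat) : Int) from rfl, PySem.List.pySetD_natCast,
          set_boundary _ _ _ (specList_length m) (by omega), specList_succ, Nat.sub_sub]
      simp only [stepB]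
      rw [hg, hfst, innerB_conv]
      have hLlt : ∀ x ∈ (List.range (N - (m + 1))).map (fun t => m + 1 + t), x < P.2.length := by
        intro x hx
        rw [List.mem_map] at hx
        obtain ⟨t, ht, rfl⟩ := hx
        rw [List.mem_range] at ht
        rw [hlen]; omega
      refine ⟨rfl, ?_, ?_⟩
      · rw [innerB_len, hlen]
      · intro m' hm'1 hm'2 v
        rw [innerB_mem _ _ _ _ hLlt, hinv m' (by omega) hm'2 v]
        have hmemL : m' ∈ (List.range (N - (m + 1))).map (fun t => m + 1 + t) := by
          rw [List.mem_map]
          exact ⟨m' - (m + 1), by rw [List.mem_range]; omega, by omega⟩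
        constructor
        · rintro (⟨k, hk, hgcd, rfl⟩ | ⟨_, hgcd, rfl⟩)
          · exact ⟨k, by omega, hgcd, (specList_getD_succ_lt m k hk).symm⟩
          · exact ⟨m, by omega, hgcd, (specList_getD_self m).symm⟩
        · rintro ⟨k, hk, hgcd, rfl⟩
          by_cases hkm : k < m
          · exact Or.inl ⟨k, hkm, hgcd, specList_getD_succ_lt m k hkm⟩
          · have : k = m := by omega
            subst this
            exact Or.inr ⟨hmemL, hgcd, specList_getD_self k⟩

theorem B_eq (n : Int) : brute_grundy_alt n = specList n.toNat := by
  by_cases hn : n ≤ 0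
  · simp only [brute_grundy_alt]
    rw [PySem.List.pyRange_one_eq_nil (a := 1) (by omega), PySem.List.pyRange_one_eq_nil (a := 0) (by omega),
      List.foldl_nil, if_neg (by omega),
      PySem.List.pyRepeat_singleton, show n.toNat = 0 by omega]
    rfl
  · replace hn : 0 < n := by omega
    obtain ⟨N, rfl⟩ : ∃ N : Nat, n = (N : Int) := ⟨n.toNat, by omega⟩
    have hN : 1 ≤ N := by omega
    simp only [brute_grundy_alt]
    have hseen0 : (PySem.List.pyRange 0 (N : Int) 1).map
        (fun _ => (PySem.Set.empty : PySem.Set Int)) = List.replicate N [] := by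
      rw [List.map_const']
      congr 1
      rw [PySem.List.length_pyRange_one]; omega
    rw [PySem.List.pyRepeat_singleton, Int.toNat_natCast, hseen0]
    by_cases hN2 : 2 ≤ N
    · rw [if_pos (show (1 : Int) < ((N : Nat) : Int) by exact_mod_cast (by omega : (1 : Nat) < N))]
      have hget : PySem.List.pyGetD (List.replicate N ([] : PySem.Set Int)) 1 PySem.Set.empty
          = [] := by
        rw [show (1 : Int) = ((1 : Nat) : Int) from rfl, PySem.List.pyGetD_natCast]
        simp [List.getD_eq_getElem?_getD, (show 1 < N by omega)]
      have hseed : PySem.List.pySetD (List.replicate N ([] : PySem.Set Int)) 1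
          (PySem.Set.add (PySem.List.pyGetD (List.replicate N ([] : PySem.Set Int)) 1
            PySem.Set.empty) 0)
          = (List.replicate N ([] : PySem.Set Int)).set 1 [0] := by
        rw [hget, show (1 : Int) = ((1 : Nat) : Int) from rfl, PySem.List.pySetD_natCast]
        rfl
      rw [hseed]
      have hok : seenOK N 1 ((List.replicate N ([] : PySem.Set Int)).set 1 [0]) := by
        constructor
        · simp
        · intro m hm1 hm2 v
          constructor
          · intro hv
            by_cases hm : m = 1
            · subst hm
              rw [getD_set_self _ _ _ _ (by simp; omega)] at hv
              rcases List.mem_singleton.1 hv with rfl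
              refine ⟨0, by omega, by simp, ?_⟩
              rw [specList_one]; rfl
            · rw [getD_set_ne _ _ _ _ _ hm] at hv
              rw [List.getD_eq_getElem?_getD, List.getElem?_replicate] at hv
              simp only [if_pos hm2] at hv
              cases hv
          · rintro ⟨k, hk, hgcd, rfl⟩
            have hk0 : k = 0 := by omega
            subst hk0
            rw [Nat.gcd_zero_right] at hgcd
            subst hgcd
            rw [getD_set_self _ _ _ _ (by simp; omega)]
            rw [specList_one]
            simp
      obtain ⟨hf, _⟩ := loopB N hN _ hok N hN le_rfl
      rw [hf]
      simp
    · have hN1 : N = 1 := by omega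
      subst hN1
      rw [if_neg (by omega)]
      have hok : seenOK 1 1 (List.replicate 1 ([] : PySem.Set Int)) := by
        exact ⟨by simp, fun m hm1 hm2 v => by omega⟩
      obtain ⟨hf, _⟩ := loopB 1 le_rfl _ hok 1 le_rfl le_rfl
      rw [hf]
      simp

-- ===== VERDICT (by name: the statement is the Claim_ definition above) =====
theorem brute_grundy_spec : Claim_equal_brute_grundy := by
  intro n _
  unfold Spec_brute_grundy
  rw [A_eq, B_eq]
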